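-- pv_equiv track=rewrite | github.com/openfoodfacts/openfoodfacts-server | scripts/imports/fdc/fdc_import/script/mappers.py | find_preferred_entry
-- ===== SOURCE A (Python) =====
-- def find_preferred_entry(entries: list, code_priority: dict) -> dict | None:
--     best_priority = float("inf")
--     last_best_entry = None
--
--     for entry in entries:
--         entry_code = entry.get("foodNutrientDerivation", {}).get("code")
--         priority = code_priority.get(entry_code, float("inf"))
--
--         if priority < best_priority:
--             best_priority = priority
--             last_best_entry = entry
--         elif priority == best_priority:
--             last_best_entry = entry
--
--     return last_best_entry
-- ===== SOURCE B (Python) =====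
-- def find_preferred_entry(entries: list, code_priority: dict) -> dict | None:
--     if not entries:
--         return None
--     inf = float("inf")
--     priorities = [
--         code_priority.get(e.get("foodNutrientDerivation", {}).get("code"), inf)
--         for e in entries
--     ]
--     m = min(priorities)
--     for i in reversed(range(len(entries))):
--         if priorities[i] == m:
--             return entries[i]
-- ===== Notes on version B (the rewrite author's own statement) =====
-- stated objective: alternative
-- what changed: Replaces the single running-best scan with a build-priority-table / min / reverse-scan decomposition: map each entry to its priority, take min, then return the first entry from the back whose priority equals the minimum (the last tied minimum).
import Mathlib
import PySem

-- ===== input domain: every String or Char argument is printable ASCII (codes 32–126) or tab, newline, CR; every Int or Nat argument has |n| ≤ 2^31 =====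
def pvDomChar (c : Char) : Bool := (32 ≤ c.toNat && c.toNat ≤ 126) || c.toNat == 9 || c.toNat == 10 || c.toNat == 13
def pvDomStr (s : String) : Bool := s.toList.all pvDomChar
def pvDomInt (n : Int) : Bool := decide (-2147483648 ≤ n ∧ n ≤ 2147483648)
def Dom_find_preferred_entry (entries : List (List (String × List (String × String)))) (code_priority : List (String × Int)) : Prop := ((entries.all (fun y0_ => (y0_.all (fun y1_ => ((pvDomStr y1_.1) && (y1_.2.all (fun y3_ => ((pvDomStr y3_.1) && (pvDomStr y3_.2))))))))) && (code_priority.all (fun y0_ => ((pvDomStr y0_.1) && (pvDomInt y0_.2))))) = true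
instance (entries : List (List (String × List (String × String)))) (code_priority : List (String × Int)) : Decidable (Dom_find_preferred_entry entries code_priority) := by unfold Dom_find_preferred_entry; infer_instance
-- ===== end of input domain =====

-- B restructures A's single running-best scan into a priority-table / min / reverse-scan decomposition (alternative, same cost).

-- ===== PORT A =====
-- Priorities are Int except float("inf"): modelled as Option Int with `none` = inf.
-- pvPrio: code_priority.get(entry.get("foodNutrientDerivation", {}).get("code"), inf)
-- (a missing code or a code absent from code_priority both give inf = none).
def pvPrio (code_priority : List (String × Int)) (entry : List (String × List (String × String))) : Option Int :=
  match PySem.Dict.get? (PySem.Dict.mk (PySem.Dict.getD (PySem.Dict.mk entry) "foodNutrientDerivation" ([] : List (String × String)))) "code" with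
  | none => none
  | some c => PySem.Dict.get? (PySem.Dict.mk code_priority) c

-- `p < q` on priorities (none = inf): exact for Python's `<` on int/float("inf").
def pvPltInf : Option Int → Option Int → Bool
  | some a, some b => decide (a < b)
  | some _, none => true
  | none, _ => false

-- A's loop body: update (best_priority, last_best_entry).
def pvStep (code_priority : List (String × Int))
    (st : Option Int × Option (List (String × List (String × String))))
    (entry : List (String × List (String × String))) :
    Option Int × Option (List (String × List (String × String))) :=
  let p := pvPrio code_priority entry
  if pvPltInf p st.1 then (p, some entry)
  else if p == st.1 then (st.1, some entry)
  else st

def find_preferred_entry (entries : List (List (String × List (String × String)))) (code_priority : List (String × Int)) : Option (List (String × List (String × String))) :=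
  (entries.foldl (pvStep code_priority) (none, none)).2

-- ===== PORT B =====
-- builtin min on the (nonempty) priority list, ported as the left fold keeping the first minimum.
def pvMinInf (m p : Option Int) : Option Int := if pvPltInf p m then p else m

def find_preferred_entry_alt (entries : List (List (String × List (String × String)))) (code_priority : List (String × Int)) : Option (List (String × List (String × String))) :=
  if entries.isEmpty then none
  else
    let priorities := entries.map (pvPrio code_priority)
    let m := priorities.tail.foldl pvMinInf (priorities.headD none)
    match (List.range entries.length).reverse.find? (fun i => priorities.getD i none == m) with
    | some i => entries[i]?
    | none => none

-- ===== PRECONDITION & SPEC =====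
def Spec_find_preferred_entry (entries : List (List (String × List (String × String)))) (code_priority : List (String × Int)) (out : Option (List (String × List (String × String)))) : Prop := out = find_preferred_entry_alt entries code_priority
instance (entries : List (List (String × List (String × String)))) (code_priority : List (String × Int)) (out : Option (List (String × List (String × String)))) : Decidable (Spec_find_preferred_entry entries code_priority out) := by unfold Spec_find_preferred_entry; infer_instance

-- ===== CLAIM (what is proved, stated in full; the proofs are below) =====
def Claim_equal_find_preferred_entry : Prop := ∀ (entries : List (List (String × List (String × String)))) (code_priority : List (String × Int)), Dom_find_preferred_entry entries code_priority → Spec_find_preferred_entry entries code_priority (find_preferred_entry entries code_priority)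

-- ===== LEMMAS AND PROOFS =====

-- min of all priorities, as a fold from none (= inf)
def pvMinP (code_priority : List (String × Int)) (xs : List (List (String × List (String × String)))) : Option Int :=
  (xs.map (pvPrio code_priority)).foldl pvMinInf none

-- B's find-from-the-back phase, with the min written as pvMinP
def pvBFind (code_priority : List (String × Int)) (xs : List (List (String × List (String × String)))) : Option (List (String × List (String × String))) :=
  match (List.range xs.length).reverse.find? (fun i => (xs.map (pvPrio code_priority)).getD i none == pvMinP code_priority xs) with
  | some i => xs[i]?
  | none => none

lemma pvMinInf_none (p : Option Int) : pvMinInf none p = p := by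
  cases p <;> simp [pvMinInf, pvPltInf]

lemma pvStep_fst (cp : List (String × Int))
    (st : Option Int × Option (List (String × List (String × String))))
    (x : List (String × List (String × String))) :
    (pvStep cp st x).1 = pvMinInf st.1 (pvPrio cp x) := by
  simp only [pvStep, pvMinInf]
  split_ifs with h1 h2 <;> simp_all

lemma pvFoldl_fst (cp : List (String × Int)) :
    ∀ (xs : List (List (String × List (String × String))))
      (st : Option Int × Option (List (String × List (String × String)))),
      (xs.foldl (pvStep cp) st).1 = (xs.map (pvPrio cp)).foldl pvMinInf st.1 := by
  intro xs
  induction xs with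
  | nil => intro st; rfl
  | cons x xs ih =>
    intro st
    simp only [List.foldl_cons, List.map_cons]
    rw [ih, pvStep_fst]

lemma pvFind?_congr {α : Type} (p q : α → Bool) :
    ∀ (l : List α), (∀ a ∈ l, p a = q a) → l.find? p = l.find? q := by
  intro l
  induction l with
  | nil => intro _; rfl
  | cons x xs ih =>
    intro h
    simp only [List.find?_cons]
    rw [h x (by simp)]
    cases q x
    · exact ih (fun a ha => h a (by simp [ha]))
    · rfl

lemma pvTrichotomy (p m : Option Int) :
    pvPltInf p m = true ∨ p = m ∨ (pvPltInf p m = false ∧ (p == m) = false) := by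
  cases p <;> cases m <;> simp [pvPltInf] <;> omega

lemma pvPltInf_irrefl (a : Option Int) : pvPltInf a a = false := by
  cases a
  · rfl
  · simp [pvPltInf]

lemma pvMain (cp : List (String × Int)) :
    ∀ (xs : List (List (String × List (String × String)))),
      (xs.foldl (pvStep cp) (none, none)).2 = pvBFind cp xs := by
  intro xs
  induction xs using List.reverseRecOn with
  | nil => rfl
  | append_singleton xs x ih =>
    have hlen : (xs ++ [x]).length = xs.length + 1 := by simp
    have hmin : pvMinP cp (xs ++ [x]) = pvMinInf (pvMinP cp xs) (pvPrio cp x) := by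
      simp [pvMinP, List.foldl_append]
    have hfst : (xs.foldl (pvStep cp) (none, none)).1 = pvMinP cp xs := pvFoldl_fst cp xs _
    have hrange : (List.range (xs.length + 1)).reverse = xs.length :: (List.range xs.length).reverse := by
      rw [List.range_succ]; simp
    have hgetlast : ((xs ++ [x]).map (pvPrio cp)).getD xs.length none = pvPrio cp x := by
      simp [List.getD, List.map_append]
    have hgetlt : ∀ i, i < xs.length →
        ((xs ++ [x]).map (pvPrio cp)).getD i none = (xs.map (pvPrio cp)).getD i none := by
      intro i hi
      simp only [List.getD, List.map_append]
      rw [List.getElem?_append_left (by simpa using hi)]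
    rw [List.foldl_append]
    simp only [List.foldl_cons, List.foldl_nil]
    rcases pvTrichotomy (pvPrio cp x) (pvMinP cp xs) with hlt | heq | ⟨hnlt, hne⟩
    · -- strictly smaller: new min is the last priority, so the last index matches
      have hstep : pvStep cp (xs.foldl (pvStep cp) (none, none)) x = (pvPrio cp x, some x) := by
        simp [pvStep, hfst, hlt]
      have hmin' : pvMinP cp (xs ++ [x]) = pvPrio cp x := by
        rw [hmin]; simp [pvMinInf, hlt]
      rw [hstep]
      simp only [pvBFind, hlen, hrange, List.find?_cons, hgetlast, hmin', beq_self_eq_true]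
      simp
    · -- equal: still matches at the last index
      have hstep : pvStep cp (xs.foldl (pvStep cp) (none, none)) x =
          (pvMinP cp xs, some x) := by
        simp [pvStep, hfst, heq, pvPltInf_irrefl]
      have hmin' : pvMinP cp (xs ++ [x]) = pvPrio cp x := by
        rw [hmin, heq]
        cases pvMinP cp xs <;> simp [pvMinInf, pvPltInf]
      rw [hstep]
      simp only [pvBFind, hlen, hrange, List.find?_cons, hgetlast, hmin', beq_self_eq_true]
      simp
    · -- strictly larger / incomparable: state unchanged, last index does not match
      have hstep : pvStep cp (xs.foldl (pvStep cp) (none, none)) x =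
          xs.foldl (pvStep cp) (none, none) := by
        simp [pvStep, hfst, hnlt, hne]
      have hmin' : pvMinP cp (xs ++ [x]) = pvMinP cp xs := by
        rw [hmin]; simp [pvMinInf, hnlt]
      rw [hstep, ih]
      simp only [pvBFind, hlen, hrange, List.find?_cons, hgetlast, hmin', hne]
      have hcongr : ((List.range xs.length).reverse.find?
            (fun i => ((xs ++ [x]).map (pvPrio cp)).getD i none == pvMinP cp xs)) =
          ((List.range xs.length).reverse.find?
            (fun i => (xs.map (pvPrio cp)).getD i none == pvMinP cp xs)) := by
        apply pvFind?_congr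
        intro i hi
        have hi' : i < xs.length := by simpa using hi
        rw [hgetlt i hi']
      rw [hcongr]
      cases hfind : ((List.range xs.length).reverse.find?
          (fun i => (xs.map (pvPrio cp)).getD i none == pvMinP cp xs)) with
      | none => rfl
      | some i =>
        have hi : i < xs.length := by
          have := List.mem_of_find?_eq_some hfind
          simpa using this
        simp only []
        rw [List.getElem?_append_left hi]

-- B's locally-computed min (headD/tail fold) equals pvMinP on a nonempty list
lemma pvMinHead (cp : List (String × Int)) (xs : List (List (String × List (String × String)))) (h : xs ≠ []) :
    ((xs.map (pvPrio cp)).tail.foldl pvMinInf ((xs.map (pvPrio cp)).headD none)) = pvMinP cp xs := by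
  cases xs with
  | nil => exact absurd rfl h
  | cons y ys => simp [pvMinP, pvMinInf_none]

lemma pvAlt_eq_bFind (cp : List (String × Int)) (xs : List (List (String × List (String × String)))) :
    find_preferred_entry_alt xs cp = pvBFind cp xs := by
  by_cases h : xs = []
  · subst h; rfl
  · simp only [find_preferred_entry_alt, List.isEmpty_iff, h, if_false, pvBFind]
    rw [pvMinHead cp xs h]

-- ===== VERDICT (by name: the statement is the Claim_ definition above) =====
theorem find_preferred_entry_spec : Claim_equal_find_preferred_entry := by
  intro entries cp _
  unfold Spec_find_preferred_entry find_preferred_entry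
  rw [pvAlt_eq_bFind, pvMain]
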